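-- pv_equiv track=rewrite | github.com/sgrote/d_toolbox | pw_diverge.py | comp_one_homo
-- ===== SOURCE A (Python) =====
-- def comp_one_homo (gt1, gt2):
-- 	'''
-- 	compare divergence of one pop-match with all homozygous genotypes
-- 	'''
-- 	match = 0
-- 	mismatch = 0
-- 	# remove "./." and ".|." before comparing
-- 	gt1_called = [gt for gt in gt1 if gt not in ["./.", ".|."]]
-- 	gt2_called = [gt for gt in gt2 if gt not in ["./.", ".|."]]
-- 	for g1 in gt1_called:
-- 		g1 = g1.replace("|","/")
-- 		for g2 in gt2_called:
-- 			g2 = g2.replace("|","/")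
-- 			# check for match
-- 			if g1 == g2:
-- 				match += 1
-- 			else:
-- 				mismatch += 1
-- 	return match, mismatch
-- ===== SOURCE B (Python) =====
-- def comp_one_homo(gt1, gt2):
--     '''
--     compare divergence of one pop-match with all homozygous genotypes
--     (frequency-counting reimplementation)
--     '''
--     norm2 = [g.replace("|", "/") for g in gt2 if g not in ("./.", ".|.")]
--     c2 = {}
--     for g in norm2:
--         c2[g] = c2.get(g, 0) + 1
--     match = 0
--     n1 = 0
--     for g in gt1:
--         if g not in ("./.", ".|."):
--             n1 += 1
--             match += c2.get(g.replace("|", "/"), 0)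
--     return match, n1 * len(norm2) - match
-- ===== Notes on version B (the rewrite author's own statement) =====
-- stated objective: faster
-- what changed: B replaces A's nested loop over all genotype pairs by a single frequency dictionary of the normalized called genotypes of gt2, so match = sum of counts looked up per element of gt1 and mismatch = n1*n2 - match.
import Mathlib
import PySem

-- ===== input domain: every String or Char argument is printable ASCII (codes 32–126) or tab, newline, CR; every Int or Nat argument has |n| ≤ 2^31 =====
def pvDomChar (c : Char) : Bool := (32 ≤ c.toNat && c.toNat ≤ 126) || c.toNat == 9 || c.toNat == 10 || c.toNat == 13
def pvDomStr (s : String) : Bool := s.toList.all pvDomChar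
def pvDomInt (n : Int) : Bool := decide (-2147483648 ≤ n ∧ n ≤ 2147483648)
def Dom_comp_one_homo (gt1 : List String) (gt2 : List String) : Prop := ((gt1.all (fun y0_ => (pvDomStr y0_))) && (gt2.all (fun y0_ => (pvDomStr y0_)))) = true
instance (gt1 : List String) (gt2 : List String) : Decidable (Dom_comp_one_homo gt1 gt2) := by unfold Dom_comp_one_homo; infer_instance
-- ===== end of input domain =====

-- B replaces A's nested pair loop by a frequency dictionary of gt2's normalized called
-- genotypes (match = sum of lookups, mismatch = n1*n2 - match): asymptotically faster.


-- ===== PORT A =====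
def comp_one_homo (gt1 : List String) (gt2 : List String) : Int × Int :=
  let gt1_called := gt1.filter (fun gt => !(gt == "./." || gt == ".|."))
  let gt2_called := gt2.filter (fun gt => !(gt == "./." || gt == ".|."))
  let p := gt1_called.foldl (fun (p : Int × Int) g1 =>
    let g1 := PySem.Str.replace g1 "|" "/"
    gt2_called.foldl (fun (q : Int × Int) g2 =>
      let g2 := PySem.Str.replace g2 "|" "/"
      if g1 == g2 then (q.1 + 1, q.2) else (q.1, q.2 + 1)) p) (0, 0)
  (p.1, p.2)

-- ===== PORT B =====
def comp_one_homo_alt (gt1 : List String) (gt2 : List String) : Int × Int :=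
  let norm2 := (gt2.filter (fun g => !(g == "./." || g == ".|."))).map
      (fun g => PySem.Str.replace g "|" "/")
  let c2 := norm2.foldl
      (fun (d : PySem.Dict String Int) g => d.insert g (d.getD g 0 + 1)) PySem.Dict.empty
  let p := gt1.foldl (fun (p : Int × Int) g =>
      if !(g == "./." || g == ".|.") then
        (p.1 + c2.getD (PySem.Str.replace g "|" "/") 0, p.2 + 1)
      else p) (0, 0)
  (p.1, p.2 * (norm2.length : Int) - p.1)

-- ===== PRECONDITION & SPEC =====
def Spec_comp_one_homo (gt1 : List String) (gt2 : List String) (out : Int × Int) : Prop := out = comp_one_homo_alt gt1 gt2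
instance (gt1 : List String) (gt2 : List String) (out : Int × Int) : Decidable (Spec_comp_one_homo gt1 gt2 out) := by unfold Spec_comp_one_homo; infer_instance

-- ===== CLAIM (what is proved, stated in full; the proofs are below) =====
def Claim_equal_comp_one_homo : Prop := ∀ (gt1 : List String) (gt2 : List String), Dom_comp_one_homo gt1 gt2 → Spec_comp_one_homo gt1 gt2 (comp_one_homo gt1 gt2)

-- ===== LEMMAS AND PROOFS =====

-- normalization and the per-element match count
def pvNrm (g : String) : String := PySem.Str.replace g "|" "/"
def pvS (L2 : List String) (L1 : List String) : Int :=
  (L1.map (fun g => ((L2.map pvNrm).count (pvNrm g) : Int))).sum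

-- A's inner loop over L2 adds the match count and the complementary mismatch count
theorem pvInnerA (L2 : List String) (s : String) (p : Int × Int) :
    L2.foldl (fun (q : Int × Int) g2 =>
      let g2 := PySem.Str.replace g2 "|" "/"
      if s == g2 then (q.1 + 1, q.2) else (q.1, q.2 + 1)) p
    = (p.1 + ((L2.map pvNrm).count s : Int),
       p.2 + ((L2.length : Int) - ((L2.map pvNrm).count s : Int))) := by
  induction L2 generalizing p with
  | nil => simp
  | cons g t ih =>
    simp only [List.foldl_cons, List.map_cons, List.count_cons, List.length_cons]
    by_cases h : s = pvNrm g
    · simp only [pvNrm] at h ⊢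
      rw [if_pos (by simp [h]), ih]
      simp only [Prod.mk.injEq, ← h, beq_self_eq_true, if_pos]
      constructor <;> push_cast <;> omega
    · simp only [pvNrm] at h ⊢
      rw [if_neg (by simpa using h), ih]
      have : (PySem.Str.replace g "|" "/" == s) = false := by
        simpa using fun he => h he.symm
      simp only [this, Prod.mk.injEq]
      constructor <;> push_cast <;> omega

-- A's outer loop over L1 accumulates the sums
theorem pvOuterA (L2 : List String) (L1 : List String) (p : Int × Int) :
    L1.foldl (fun (p : Int × Int) g1 =>
      let g1 := PySem.Str.replace g1 "|" "/"
      L2.foldl (fun (q : Int × Int) g2 =>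
        let g2 := PySem.Str.replace g2 "|" "/"
        if g1 == g2 then (q.1 + 1, q.2) else (q.1, q.2 + 1)) p) p
    = (p.1 + pvS L2 L1,
       p.2 + (L1.length : Int) * (L2.length : Int) - pvS L2 L1) := by
  induction L1 generalizing p with
  | nil => simp [pvS]
  | cons g t ih =>
    simp only [List.foldl_cons]
    rw [show (L2.foldl (fun (q : Int × Int) g2 =>
        let g2 := PySem.Str.replace g2 "|" "/"
        if PySem.Str.replace g "|" "/" == g2 then (q.1 + 1, q.2) else (q.1, q.2 + 1)) p)
      = (p.1 + ((L2.map pvNrm).count (pvNrm g) : Int),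
         p.2 + ((L2.length : Int) - ((L2.map pvNrm).count (pvNrm g) : Int)))
      from pvInnerA L2 (pvNrm g) p]
    rw [ih]
    simp only [pvS, List.map_cons, List.sum_cons, List.length_cons, Prod.mk.injEq]
    constructor <;> push_cast <;> ring

-- B's counter dictionary looks up exactly the match count
theorem pvC2getD (M : List String) (s : String) :
    (M.foldl
      (fun (d : PySem.Dict String Int) g => d.insert g (d.getD g 0 + 1)) PySem.Dict.empty).getD s 0
    = (M.count s : Int) := by
  rw [PySem.Dict.foldl_insert_getD_add_one_eq_counter, PySem.Dict.getD_counter]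

-- B's single pass over gt1 sums the counter lookups and counts the called entries
theorem pvFoldB (M : List String) (gt1 : List String) (p : Int × Int) :
    gt1.foldl (fun (p : Int × Int) g =>
      if !(g == "./." || g == ".|.") then
        (p.1 + (M.foldl (fun (d : PySem.Dict String Int) g => d.insert g (d.getD g 0 + 1))
                  PySem.Dict.empty).getD (PySem.Str.replace g "|" "/") 0, p.2 + 1)
      else p) p
    = (p.1 + ((gt1.filter (fun g => !(g == "./." || g == ".|."))).map
          (fun g => ((M.count (pvNrm g) : Int)))).sum,
       p.2 + ((gt1.filter (fun g => !(g == "./." || g == ".|."))).length : Int)) := by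
  induction gt1 generalizing p with
  | nil => simp
  | cons g t ih =>
    simp only [List.foldl_cons, List.filter_cons]
    by_cases h : (!(g == "./." || g == ".|.")) = true
    · rw [if_pos h, if_pos h, ih, pvC2getD]
      simp only [pvNrm, List.map_cons, List.sum_cons, List.length_cons, Prod.mk.injEq]
      constructor <;> push_cast <;> ring
    · rw [if_neg h, if_neg h, ih]

-- ===== VERDICT (by name: the statement is the Claim_ definition above) =====
theorem comp_one_homo_spec : Claim_equal_comp_one_homo := by
  intro gt1 gt2 _
  unfold Spec_comp_one_homo comp_one_homo comp_one_homo_alt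
  simp only [pvOuterA, pvFoldB, pvS, List.length_map, Prod.mk.injEq]
  unfold pvNrm
  exact ⟨by ring, by ring⟩
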